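-- pv_equiv track=rewrite | github.com/linzeyang/leetcode-solutions | medium/3572.py | maxSumDistinctTriplet
-- ===== SOURCE A (Python) =====
-- from typing import List
--
-- def maxSumDistinctTriplet(x: List[int], y: List[int]) -> int:
--     num_to_idxs: dict[int, list[int]] = {}
--
--     for idx, num in enumerate(x):
--         if num not in num_to_idxs:
--             num_to_idxs[num] = [idx]
--         else:
--             num_to_idxs[num].append(idx)
--
--     if len(num_to_idxs) < 3:
--         return -1
--
--     num_to_max_y: dict[int, int] = {}
--
--     for num, idxs in num_to_idxs.items():
--         num_to_max_y[num] = max(y[idx] for idx in idxs)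
--
--     return sum(sorted(num_to_max_y.values(), reverse=True)[:3])
-- ===== SOURCE B (Python) =====
-- from typing import List
--
--
-- def _run_heads(pairs: List[tuple]) -> List[int]:
--     """pairs is sorted; collect the second component of the first pair of each
--     run of equal first components."""
--     heads: List[int] = []
--     prev = None
--     for k, v in pairs:
--         if prev is None or k != prev:
--             heads.append(v)
--             prev = k
--     return heads
--
--
-- def maxSumDistinctTriplet(x: List[int], y: List[int]) -> int:
--     if len(_run_heads([(v, 0) for v in sorted(x)])) < 3:
--         return -1
--     neg_heads = _run_heads(sorted((x[i], -y[i]) for i in range(len(x))))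
--     tops = sorted((-h for h in neg_heads), reverse=True)
--     return tops[0] + tops[1] + tops[2]
-- ===== Notes on version B (the rewrite author's own statement) =====
-- stated objective: alternative
-- what changed: Replaces A's hashmap grouping (dict of index lists, then a dict of per-group maxima) by sorting the (x, -y) pairs lexicographically and collecting the head of each run of equal x values, which is that group's maximum y; the distinct-count exit likewise counts runs of sorted(x) instead of dict keys.
import Mathlib
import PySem

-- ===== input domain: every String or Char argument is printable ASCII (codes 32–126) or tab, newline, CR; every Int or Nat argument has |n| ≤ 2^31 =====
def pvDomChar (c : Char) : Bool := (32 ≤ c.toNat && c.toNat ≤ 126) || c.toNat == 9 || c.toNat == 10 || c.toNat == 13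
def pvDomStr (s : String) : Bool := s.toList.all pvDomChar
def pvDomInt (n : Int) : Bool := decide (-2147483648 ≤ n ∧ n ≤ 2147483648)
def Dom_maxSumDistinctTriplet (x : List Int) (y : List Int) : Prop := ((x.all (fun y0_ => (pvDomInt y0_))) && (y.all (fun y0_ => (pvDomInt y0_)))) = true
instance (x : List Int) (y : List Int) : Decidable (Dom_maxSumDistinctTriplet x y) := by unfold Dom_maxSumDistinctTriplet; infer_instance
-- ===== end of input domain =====

-- B replaces A's hashmap grouping (a dict of index lists, then a dict of per-group maxima)
-- by sorting the (x, -y) pairs lexicographically and collecting the head of each run of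
-- equal x values (that head's -y is minimal, so its y is the group maximum); the
-- distinct-count exit likewise counts runs of sorted(x) (objective: alternative).

-- ===== PORT A =====
-- port of Python's max(y[idx] for idx in idxs): iterate, keeping the running maximum
-- (groups are always nonempty in A, so the [] branch is unreachable). y[idx] is ported in
-- the total form pyGetD, exact under Pre_ (every stored index is < len y there).
def pvMaxOver (y : List Int) (idxs : List Int) : Int :=
  match idxs with
  | [] => 0
  | j :: t => t.foldl (fun m i => max m (PySem.List.pyGetD y i 0)) (PySem.List.pyGetD y j 0)

def maxSumDistinctTriplet (x : List Int) (y : List Int) : Int :=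
  let numToIdxs : PySem.Dict Int (List Int) :=
    (PySem.List.enumerate x).foldl (fun d p =>
      if d.contains p.2 = false then d.insert p.2 [p.1]
      else d.insert p.2 (d.getD p.2 [] ++ [p.1])) PySem.Dict.empty
  if numToIdxs.size < 3 then -1
  else
    let numToMaxY : PySem.Dict Int Int :=
      numToIdxs.items.foldl (fun d q => d.insert q.1 (pvMaxOver y q.2)) PySem.Dict.empty
    ((PySem.List.sorted numToMaxY.values (fun v => v) true).take 3).sum

-- ===== PORT B =====
-- port of Source B's _run_heads: walk the pair list keeping (prev, heads), appending the
-- second component whenever the first component starts a new run.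
def pvRunHeads (pairs : List (Int × Int)) : List Int :=
  (pairs.foldl (fun st p =>
      if st.1 = none ∨ st.1 ≠ some p.1 then (some p.1, st.2 ++ [p.2]) else st)
    ((none : Option Int), ([] : List Int))).2

-- x[i] / y[i] ported in the total form pyGetD; exact under Pre_ (i < len x ≤ len y there).
def maxSumDistinctTriplet_alt (x : List Int) (y : List Int) : Int :=
  if PySem.List.len (pvRunHeads ((PySem.List.sorted x (fun v => v) false).map
      (fun v => (v, (0 : Int))))) < 3 then -1
  else
    let negHeads := pvRunHeads (PySem.List.sorted2
      ((PySem.List.pyRange 0 (PySem.List.len x)).map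
        (fun i => (PySem.List.pyGetD x i 0, -(PySem.List.pyGetD y i 0))))
      (fun p => p.1) (fun p => p.2) false)
    let tops := PySem.List.sorted (negHeads.map (fun h => -h)) (fun v => v) true
    PySem.List.pyGetD tops 0 0 + PySem.List.pyGetD tops 1 0 + PySem.List.pyGetD tops 2 0

-- ===== PRECONDITION & SPEC =====
-- Pre_ is exactly where the Python A returns: when x has at least 3 distinct values A reads
-- y[idx] for every index idx < len x, so it raises IndexError iff len y < len x; with fewer
-- than 3 distinct values it returns -1 before touching y. B returns on exactly the same inputs.
def Pre_maxSumDistinctTriplet (x : List Int) (y : List Int) : Prop :=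
  x.length ≤ y.length ∨ (PySem.List.dedup x).length < 3
instance (x : List Int) (y : List Int) : Decidable (Pre_maxSumDistinctTriplet x y) := by
  unfold Pre_maxSumDistinctTriplet; infer_instance

def pvWitness_maxSumDistinctTriplet : List Int × List Int := ([1, 2, 2, 3], [5, -1, 4, 7])

def Spec_maxSumDistinctTriplet (x : List Int) (y : List Int) (out : Int) : Prop := out = maxSumDistinctTriplet_alt x y
instance (x : List Int) (y : List Int) (out : Int) : Decidable (Spec_maxSumDistinctTriplet x y out) := by unfold Spec_maxSumDistinctTriplet; infer_instance

-- ===== CLAIM (what is proved, stated in full; the proofs are below) =====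
def Claim_equal_maxSumDistinctTriplet : Prop := ∀ (x : List Int) (y : List Int), Dom_maxSumDistinctTriplet x y → Pre_maxSumDistinctTriplet x y → Spec_maxSumDistinctTriplet x y (maxSumDistinctTriplet x y)

-- ===== LEMMAS AND PROOFS =====

-- the lexicographic order B's pair sort produces
def pvLexLE (p q : Int × Int) : Prop := p.1 < q.1 ∨ (p.1 = q.1 ∧ p.2 ≤ q.2)

def pvMax' : List Int → Int
  | [] => 0
  | a :: t => t.foldl max a

def pvMin' : List Int → Int
  | [] => 0
  | a :: t => t.foldl min a

-- recursion form of B's run-head walk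
def pvRunAux : Option Int → List (Int × Int) → List Int
  | _, [] => []
  | prev, p :: t => if some p.1 = prev then pvRunAux prev t else p.2 :: pvRunAux (some p.1) t

def pvKeyMin (rs : List (Int × Int)) (k : Int) : Int :=
  pvMin' ((rs.filter (fun p => p.1 == k)).map (·.2))

def pvKeyMax (rs : List (Int × Int)) (k : Int) : Int :=
  pvMax' ((rs.filter (fun p => p.1 == k)).map (·.2))

-- the (x[i], y[i]) pair list both sides group
def pvPairs (x y : List Int) : List (Int × Int) :=
  (PySem.List.pyRange 0 (PySem.List.len x)).map
    (fun i => (PySem.List.pyGetD x i 0, PySem.List.pyGetD y i 0))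

-- A's grouping step and the index groups of each prefix
def pvStepA (x : List Int) (d : PySem.Dict Int (List Int)) (i : Int) : PySem.Dict Int (List Int) :=
  if d.contains (PySem.List.pyGetD x i 0) = false then d.insert (PySem.List.pyGetD x i 0) [i]
  else d.insert (PySem.List.pyGetD x i 0) (d.getD (PySem.List.pyGetD x i 0) [] ++ [i])

def pvJ (x : List Int) (m : Int) (k : Int) : List Int :=
  (PySem.List.pyRange 0 m).filter (fun i => PySem.List.pyGetD x i 0 == k)

lemma pvMin'_le_of_all (l : List Int) (a : Int) (h : ∀ b ∈ l, a ≤ b) : l.foldl min a = a := by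
  rcases PySem.List.foldl_min_mem l a with h1 | h1
  · exact h1
  · exact le_antisymm (PySem.List.foldl_min_le l a).1 (h _ h1)

lemma pvMin'_perm (l1 l2 : List Int) (h : l1.Perm l2) : pvMin' l1 = pvMin' l2 := by
  cases l1 with
  | nil => rw [h.nil_eq]
  | cons a t =>
    cases l2 with
    | nil => exact absurd h.symm.nil_eq (by simp)
    | cons b s =>
      have hm1 : pvMin' (a :: t) ∈ a :: t := by
        rcases PySem.List.foldl_min_mem t a with h1 | h1
        · simp [pvMin', h1]
        · simp [pvMin']; right; exact (by simpa using h1)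
      have hm2 : pvMin' (b :: s) ∈ b :: s := by
        rcases PySem.List.foldl_min_mem s b with h1 | h1
        · simp [pvMin', h1]
        · simp [pvMin']; right; exact (by simpa using h1)
      have hle1 : ∀ c ∈ a :: t, pvMin' (a :: t) ≤ c := by
        intro c hc
        rcases List.mem_cons.mp hc with rfl | hc
        · exact (PySem.List.foldl_min_le t c).1
        · exact (PySem.List.foldl_min_le t a).2 c hc
      have hle2 : ∀ c ∈ b :: s, pvMin' (b :: s) ≤ c := by
        intro c hc
        rcases List.mem_cons.mp hc with rfl | hc
        · exact (PySem.List.foldl_min_le s c).1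
        · exact (PySem.List.foldl_min_le s b).2 c hc
      exact le_antisymm (hle1 _ (h.mem_iff.mpr hm2)) (hle2 _ (h.mem_iff.mp hm1))

lemma pvMin'_neg (l : List Int) : pvMin' (l.map (fun v => -v)) = -(pvMax' l) := by
  cases l with
  | nil => simp [pvMin', pvMax']
  | cons a t =>
    simp only [List.map_cons, pvMin', pvMax']
    induction t generalizing a with
    | nil => simp
    | cons c t ih =>
      simp only [List.map_cons, List.foldl_cons]
      rw [← ih (max a c)]
      congr 1
      omega

lemma pvRunHeads_aux (rs : List (Int × Int)) : ∀ (prev : Option Int) (acc : List Int),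
    (rs.foldl (fun st p =>
      if st.1 = none ∨ st.1 ≠ some p.1 then (some p.1, st.2 ++ [p.2]) else st)
      (prev, acc)).2 = acc ++ pvRunAux prev rs := by
  induction rs with
  | nil => intro prev acc; simp [pvRunAux]
  | cons p t ih =>
    intro prev acc
    simp only [List.foldl_cons]
    by_cases h : some p.1 = prev
    · have hcond : ¬ (prev = none ∨ prev ≠ some p.1) := by subst h; simp
      rw [if_neg hcond, ih, pvRunAux, if_pos h]
    · have hcond : prev = none ∨ prev ≠ some p.1 := by
        right; intro he; exact h he.symm
      rw [if_pos hcond, ih, pvRunAux, if_neg h]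
      simp

lemma pvRunHeads_eq (rs : List (Int × Int)) : pvRunHeads rs = pvRunAux none rs := by
  rw [pvRunHeads, pvRunHeads_aux]; simp

lemma pvRunAux_some (rs : List (Int × Int)) (a : Int) :
    pvRunAux (some a) rs = pvRunAux none (rs.dropWhile (fun p => p.1 == a)) := by
  induction rs with
  | nil => simp [pvRunAux]
  | cons p t ih =>
    by_cases h : p.1 = a
    · rw [pvRunAux, if_pos (by rw [h]), ih, List.dropWhile_cons_of_pos (by simp [h])]
    · rw [pvRunAux, if_neg (by simp [h]), List.dropWhile_cons_of_neg (by simp [h])]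
      rw [pvRunAux]
      simp

lemma pvLexLE_trans {p q r : Int × Int} (h1 : pvLexLE p q) (h2 : pvLexLE q r) : pvLexLE p r := by
  unfold pvLexLE at *; omega

lemma pvLtb_iff (a b : Int × Int) :
    (decide (a.1 < b.1) || (!decide (b.1 < a.1) && decide (a.2 < b.2))) = false ↔ pvLexLE b a := by
  unfold pvLexLE
  by_cases h1 : a.1 < b.1 <;> by_cases h2 : b.1 < a.1 <;> by_cases h3 : a.2 < b.2 <;>
    simp [h1, h2, h3] <;> omega

lemma pvInsertBy_lex (x : Int × Int) (ys : List (Int × Int)) (h : ys.Pairwise pvLexLE) :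
    (PySem.List.insertBy
      (fun a b => decide (a.1 < b.1) || (!decide (b.1 < a.1) && decide (a.2 < b.2))) x ys).Pairwise pvLexLE := by
  induction ys with
  | nil => simp [PySem.List.insertBy]
  | cons y t ih =>
    have h' := List.pairwise_cons.mp h
    rw [PySem.List.insertBy]
    by_cases hb : (decide (x.1 < y.1) || (!decide (y.1 < x.1) && decide (x.2 < y.2))) = true
    · rw [if_pos hb]
      have hxy : pvLexLE x y := by
        rcases Bool.or_eq_true_iff.mp hb with h1 | h1
        · left; exact of_decide_eq_true h1
        · rcases Bool.and_eq_true_iff.mp h1 with ⟨h2, h3⟩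
          have h2' : ¬ (y.1 < x.1) := of_decide_eq_false (by simpa using h2)
          have h3' : x.2 < y.2 := of_decide_eq_true h3
          unfold pvLexLE; omega
      exact List.pairwise_cons.mpr ⟨by
        intro z hz
        rcases List.mem_cons.mp hz with rfl | hz
        · exact hxy
        · exact pvLexLE_trans hxy (h'.1 z hz), h⟩
    · rw [if_neg hb]
      have hyx : pvLexLE y x := (pvLtb_iff x y).mp (by simpa using hb)
      exact List.pairwise_cons.mpr ⟨by
        intro z hz
        rcases (PySem.List.mem_insertBy _ x z t).mp hz with rfl | hz
        · exact hyx
        · exact h'.1 z hz, ih h'.2⟩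

lemma pvSorted2_pairwise (rs : List (Int × Int)) :
    (PySem.List.sorted2 rs (fun p => p.1) (fun p => p.2) false).Pairwise pvLexLE := by
  show (rs.foldl (fun acc x => PySem.List.insertBy _ x acc) []).Pairwise pvLexLE
  generalize hacc : ([] : List (Int × Int)) = acc
  have hp : acc.Pairwise pvLexLE := by subst hacc; simp
  clear hacc
  induction rs generalizing acc with
  | nil => exact hp
  | cons r t ih => exact ih _ (pvInsertBy_lex r acc hp)

lemma pvOfList_cons_not_mem (a : Int) (l : List Int) (h : a ∉ l) :
    PySem.Set.ofList (a :: l) = a :: PySem.Set.ofList l := by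
  rw [PySem.Set.ofList_cons]
  congr 1
  rw [PySem.Set.discard]
  apply List.filter_eq_self.mpr
  intro b hb
  have : b ≠ a := by
    intro he; subst he
    exact h ((PySem.Set.mem_ofList l b).mp hb)
  simp [this]

lemma pvAdd_add (s : PySem.Set Int) (b : Int) : (s.add b).add b = s.add b := by
  have hb : b ∈ s.add b := (PySem.Set.mem_add s b b).mpr (Or.inr rfl)
  rw [show ((s.add b).add b) = if (s.add b).contains b = true then s.add b else (s.add b) ++ [b] from rfl]
  rw [if_pos (by rw [PySem.Set.contains]; exact List.contains_iff_mem.mpr hb)]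

lemma pvOfList_run (a : Int) (l1 l2 : List Int) (h1 : ∀ b ∈ l1, b = a) (h2 : a ∉ l2) :
    PySem.Set.ofList (a :: (l1 ++ l2)) = a :: PySem.Set.ofList l2 := by
  induction l1 with
  | nil => simpa using pvOfList_cons_not_mem a l2 h2
  | cons b t ih =>
    have hb : b = a := h1 b (by simp)
    subst hb
    have e1 : PySem.Set.ofList (b :: b :: (t ++ l2))
        = List.foldl PySem.Set.add ((PySem.Set.empty.add b).add b) (t ++ l2) := rfl
    have e2 : PySem.Set.ofList (b :: (t ++ l2))
        = List.foldl PySem.Set.add (PySem.Set.empty.add b) (t ++ l2) := rfl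
    rw [show (b :: t ++ l2) = b :: (t ++ l2) from rfl, e1, pvAdd_add, ← e2]
    exact ih (fun c hc => h1 c (by simp [hc]))

lemma pvOfList_perm (l1 l2 : List Int) (h : l1.Perm l2) :
    (PySem.Set.ofList l1).Perm (PySem.Set.ofList l2) := by
  rw [List.perm_ext_iff_of_nodup (PySem.Set.nodup_ofList l1) (PySem.Set.nodup_ofList l2)]
  intro a
  rw [PySem.Set.mem_ofList, PySem.Set.mem_ofList]
  exact h.mem_iff

-- after dropping the leading run of key a, every key is strictly larger
lemma pvDropWhile_gt : ∀ (t : List (Int × Int)), t.Pairwise pvLexLE → ∀ (a : Int),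
    (∀ q ∈ t, a ≤ q.1) → ∀ q ∈ t.dropWhile (fun p => p.1 == a), a < q.1 := by
  intro t
  induction t with
  | nil => intro _ a _ q hq; simp at hq
  | cons p tt ih =>
    intro hpw a hle q hq
    have h' := List.pairwise_cons.mp hpw
    by_cases hp : p.1 = a
    · rw [List.dropWhile_cons_of_pos (by simp [hp])] at hq
      exact ih h'.2 a (fun r hr => hle r (by simp [hr])) q hq
    · rw [List.dropWhile_cons_of_neg (by simp [hp])] at hq
      have hap : a < p.1 := lt_of_le_of_ne (hle p (by simp)) (Ne.symm hp)
      rcases List.mem_cons.mp hq with rfl | hq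
      · exact hap
      · have := h'.1 q hq
        unfold pvLexLE at this
        omega

-- on a lexicographically sorted pair list the run heads are exactly, per distinct key
-- in order of first appearance, the minimal second component of that key's group
lemma pvRunAux_sorted : ∀ (n : Nat) (rs : List (Int × Int)), rs.length ≤ n → rs.Pairwise pvLexLE →
    pvRunAux none rs = (PySem.Set.ofList (rs.map (·.1))).map (fun k => pvKeyMin rs k) := by
  intro n
  induction n with
  | zero =>
    intro rs hlen _
    have : rs = [] := List.eq_nil_of_length_eq_zero (Nat.le_zero.mp hlen)
    subst this
    simp [pvRunAux, PySem.Set.ofList]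
  | succ n ih =>
    intro rs hlen hpw
    cases rs with
    | nil => simp [pvRunAux, PySem.Set.ofList]
    | cons r t =>
      have h' := List.pairwise_cons.mp hpw
      set t1 := t.takeWhile (fun p => p.1 == r.1) with ht1
      set t2 := t.dropWhile (fun p => p.1 == r.1) with ht2
      have htsplit : t = t1 ++ t2 := (List.takeWhile_append_dropWhile).symm
      have ht2sub : t2.Sublist t := by rw [ht2]; exact List.dropWhile_sublist _
      have ht2pw : t2.Pairwise pvLexLE := h'.2.sublist ht2sub
      have ht2len : t2.length ≤ n := by
        have hb1 := ht2sub.length_le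
        have hb2 : t.length + 1 ≤ n + 1 := by simpa using hlen
        omega
      have hgt : ∀ q ∈ t2, r.1 < q.1 :=
        pvDropWhile_gt t h'.2 r.1 (fun q hq => by
          have := h'.1 q hq; unfold pvLexLE at this; omega)
      have hlhs : pvRunAux none (r :: t) = r.2 :: pvRunAux none t2 := by
        rw [pvRunAux, if_neg (by simp), pvRunAux_some]
      have ht1keys : ∀ b ∈ t1.map (·.1), b = r.1 := by
        intro b hb
        rcases List.mem_map.mp hb with ⟨q, hq, rfl⟩
        have := List.mem_takeWhile_imp hq
        simpa using this
      have ht2keys : r.1 ∉ t2.map (·.1) := by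
        intro hb
        rcases List.mem_map.mp hb with ⟨q, hq, he⟩
        exact absurd (hgt q hq) (by omega)
      have hkeys : PySem.Set.ofList ((r :: t).map (·.1))
          = r.1 :: PySem.Set.ofList (t2.map (·.1)) := by
        rw [List.map_cons, htsplit, List.map_append]
        exact pvOfList_run r.1 (t1.map (·.1)) (t2.map (·.1)) ht1keys ht2keys
      have hheadmin : pvKeyMin (r :: t) r.1 = r.2 := by
        rw [pvKeyMin, List.filter_cons_of_pos (by simp)]
        rw [List.map_cons, pvMin']
        apply pvMin'_le_of_all
        intro b hb
        rcases List.mem_map.mp hb with ⟨q, hq, rfl⟩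
        have hqt := List.mem_filter.mp hq
        have hq1 : q.1 = r.1 := by simpa using hqt.2
        have := h'.1 q hqt.1
        unfold pvLexLE at this
        omega
      have htailmin : ∀ k ∈ PySem.Set.ofList (t2.map (·.1)), pvKeyMin (r :: t) k = pvKeyMin t2 k := by
        intro k hk
        have hk2 : k ∈ t2.map (·.1) := (PySem.Set.mem_ofList _ k).mp hk
        rcases List.mem_map.mp hk2 with ⟨q0, hq0, rfl⟩
        have hrk : r.1 ≠ q0.1 := by have := hgt q0 hq0; omega
        rw [pvKeyMin, pvKeyMin, List.filter_cons_of_neg (by simp [hrk]), htsplit,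
          List.filter_append]
        have hnil : t1.filter (fun p => p.1 == q0.1) = [] := by
          apply List.filter_eq_nil_iff.mpr
          intro q hq
          have hq1 := List.mem_takeWhile_imp hq
          simp at hq1 ⊢
          omega
        rw [hnil, List.nil_append]
      rw [hlhs, ih t2 ht2len ht2pw, hkeys, List.map_cons, hheadmin]
      congr 1
      exact (List.map_congr_left htailmin).symm

lemma pvJ_succ (x : List Int) (m : Nat) (k : Int) :
    pvJ x ((m : Int) + 1) k
      = pvJ x (m : Int) k ++ (if PySem.List.pyGetD x (m : Int) 0 == k then [(m : Int)] else []) := by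
  rw [pvJ, pvJ, PySem.List.pyRange_one_succ_right (Int.natCast_nonneg m), List.filter_append]
  congr 1
  rw [List.filter_singleton]
  by_cases h : PySem.List.pyGetD x (m : Int) 0 = k <;> simp [h]

lemma pvJ_nil (x : List Int) (m : Nat) (hm : m ≤ x.length) (k : Int) (hk : k ∉ x.take m) :
    pvJ x (m : Int) k = [] := by
  apply List.filter_eq_nil_iff.mpr
  intro i hi
  have hmem := (PySem.List.mem_pyRange_one).mp hi
  have h0 : 0 ≤ i := hmem.1
  have h1 : i < (m : Int) := hmem.2
  have hlt : i.toNat < m := by omega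
  have hget : PySem.List.pyGetD x i 0 = x[i.toNat]'(by omega) :=
    PySem.List.pyGetD_eq_getElem x 0 h0 (by omega)
  rw [hget]
  simp only [beq_iff_eq]
  intro he
  apply hk
  have hlen2 : i.toNat < (x.take m).length := by
    rw [List.length_take]; omega
  have hmem2 := List.getElem_mem hlen2
  rw [List.getElem_take] at hmem2
  exact he ▸ hmem2

-- A's grouping loop on the first m indices, characterised: one entry per distinct value of
-- x.take m in first-appearance order, holding that value's index list
lemma pvDictA_items (x : List Int) : ∀ (m : Nat), m ≤ x.length →
    ((PySem.List.pyRange 0 (m : Int)).foldl (pvStepA x) PySem.Dict.empty).items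
      = (PySem.Set.ofList (x.take m)).map (fun k => (k, pvJ x (m : Int) k)) := by
  intro m
  induction m with
  | zero => intro _; simp [PySem.List.pyRange, PySem.Dict.empty, PySem.Set.ofList]
  | succ m ih =>
    intro hm1
    have hm : m ≤ x.length := by omega
    have hmlt : m < x.length := by omega
    set d := (PySem.List.pyRange 0 (m : Int)).foldl (pvStepA x) PySem.Dict.empty with hd
    have hitems := ih hm
    have hkeys : d.keys = PySem.Set.ofList (x.take m) := by
      have hk0 : d.keys = d.items.map (fun p => p.1) := rfl
      rw [hk0, hitems, List.map_map]
      simp [Function.comp_def]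
    have hknodup : d.keys.Nodup := by rw [hkeys]; exact PySem.Set.nodup_ofList _
    have hkm : PySem.List.pyGetD x (m : Int) 0 = x[m] :=
      PySem.List.pyGetD_eq_getElem x 0 (Int.natCast_nonneg m) (by omega)
    have hstep : ((PySem.List.pyRange 0 ((m : Nat) + 1 : Nat)).foldl (pvStepA x) PySem.Dict.empty)
        = pvStepA x d (m : Int) := by
      rw [show (((m : Nat) + 1 : Nat) : Int) = (m : Int) + 1 by push_cast; ring]
      rw [PySem.List.pyRange_one_succ_right (Int.natCast_nonneg m), List.foldl_append]
      simp [hd]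
    rw [hstep]
    have htake : x.take (m + 1) = x.take m ++ [x[m]] := by
      rw [List.take_add_one]
      simp [List.getElem?_eq_getElem hmlt]
    by_cases hmem : x[m] ∈ x.take m
    · -- key already present
      have hcont : d.contains x[m] = true := by
        rw [PySem.Dict.contains_eq_decide_mem_keys, hkeys]
        simp [PySem.Set.mem_ofList, hmem]
      have hget : d.getD x[m] [] = pvJ x (m : Int) x[m] := by
        apply PySem.Dict.getD_of_get?_eq_some
        apply PySem.Dict.get?_of_mem_items d _ hknodup
        rw [hitems]
        exact List.mem_map.mpr ⟨x[m], by simp [PySem.Set.mem_ofList, hmem], rfl⟩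
      rw [pvStepA, hkm, hcont, if_neg (by simp)]
      rw [PySem.Dict.items_insert_of_contains d _ hcont, hget, hitems, List.map_map]
      have hofl : PySem.Set.ofList (x.take (m + 1)) = PySem.Set.ofList (x.take m) := by
        rw [htake, PySem.Set.ofList_append_singleton,
          PySem.Set.add_of_mem (by simpa [PySem.Set.mem_ofList] using hmem)]
      rw [hofl]
      apply List.map_congr_left
      intro k hk
      simp only [Function.comp]
      rw [show (((m : Nat) + 1 : Nat) : Int) = (m : Int) + 1 by push_cast; ring, pvJ_succ, hkm]
      by_cases hke : k = x[m]
      · subst hke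
        simp
      · simp [hke, Ne.symm hke]
    · -- fresh key
      have hcont : d.contains x[m] = false := by
        rw [PySem.Dict.contains_eq_decide_mem_keys, hkeys]
        simp [PySem.Set.mem_ofList, hmem]
      rw [pvStepA, hkm, hcont, if_pos rfl]
      rw [PySem.Dict.items_insert_of_not_contains d _ hcont, hitems]
      have hofl : PySem.Set.ofList (x.take (m + 1)) = PySem.Set.ofList (x.take m) ++ [x[m]] := by
        rw [htake, PySem.Set.ofList_append_singleton,
          PySem.Set.add_of_not_mem (by simpa [PySem.Set.mem_ofList] using hmem)]
      rw [hofl, List.map_append]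
      congr 1
      · apply List.map_congr_left
        intro k hk
        have hkm' : k ≠ x[m] := by
          intro he; subst he
          exact hmem ((PySem.Set.mem_ofList _ _).mp hk)
        rw [show (((m : Nat) + 1 : Nat) : Int) = (m : Int) + 1 by push_cast; ring, pvJ_succ, hkm]
        simp [Ne.symm hkm']
      · simp only [List.map_cons, List.map_nil]
        rw [show (((m : Nat) + 1 : Nat) : Int) = (m : Int) + 1 by push_cast; ring, pvJ_succ, hkm]
        rw [pvJ_nil x m hm x[m] hmem]
        simp

lemma pvMaxOver_eq (y : List Int) (l : List Int) :
    pvMaxOver y l = pvMax' (l.map (fun i => PySem.List.pyGetD y i 0)) := by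
  cases l with
  | nil => simp [pvMaxOver, pvMax']
  | cons j t => simp [pvMaxOver, pvMax', List.foldl_map]

lemma pvKeyMax_pairs (x y : List Int) (k : Int) :
    pvKeyMax (pvPairs x y) k = pvMaxOver y (pvJ x (PySem.List.len x) k) := by
  rw [pvKeyMax, pvPairs, pvJ, PySem.List.len_eq, List.filter_map, List.map_map,
    pvMaxOver_eq]
  rfl

lemma pvSum_take3 (l : List Int) (h : 3 ≤ l.length) :
    (l.take 3).sum = PySem.List.pyGetD l 0 0 + PySem.List.pyGetD l 1 0 + PySem.List.pyGetD l 2 0 := by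
  match l, h with
  | a :: b :: c :: t, _ =>
    simp [PySem.List.pyGetD_ofNat', List.take_succ_cons]
    ring

theorem pv_alt_eq (x y : List Int) : maxSumDistinctTriplet x y = maxSumDistinctTriplet_alt x y := by
  simp only [maxSumDistinctTriplet, maxSumDistinctTriplet_alt]
  -- A's grouping dict, as a fold over range
  have hen : (PySem.List.enumerate x).foldl (fun d p =>
      if d.contains p.2 = false then d.insert p.2 [p.1]
      else d.insert p.2 (d.getD p.2 [] ++ [p.1])) PySem.Dict.empty
      = (PySem.List.pyRange 0 (PySem.List.len x)).foldl (pvStepA x) PySem.Dict.empty := by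
    rw [PySem.List.enumerate_eq_map_pyRange x 0, List.foldl_map]
    rfl
  rw [hen]
  set dA := (PySem.List.pyRange 0 (PySem.List.len x)).foldl (pvStepA x) PySem.Dict.empty with hdA
  have hitemsA : dA.items = (PySem.Set.ofList x).map (fun k => (k, pvJ x (PySem.List.len x) k)) := by
    rw [hdA, PySem.List.len_eq]
    have := pvDictA_items x x.length (le_refl _)
    rwa [List.take_length] at this
  have hsizeA : dA.size = (PySem.Set.ofList x).length := by
    rw [PySem.Dict.size, hitemsA, List.length_map]
  -- B's distinct-count run heads
  set pairs1 := (PySem.List.sorted x (fun v => v) false).map (fun v => (v, (0 : Int))) with hp1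
  have hpw1 : pairs1.Pairwise pvLexLE := by
    rw [hp1]
    apply List.pairwise_map.mpr
    apply (PySem.List.sorted_pairwise x (fun v => v)).imp
    intro a b hab
    unfold pvLexLE
    rcases lt_or_eq_of_le hab with h | h
    · left; exact h
    · right; exact ⟨h, le_refl _⟩
  have hheads1 : (pvRunHeads pairs1).length = (PySem.Set.ofList x).length := by
    rw [pvRunHeads_eq, pvRunAux_sorted pairs1.length pairs1 (le_refl _) hpw1, List.length_map]
    have hk1 : pairs1.map (·.1) = PySem.List.sorted x (fun v => v) false := by
      rw [hp1, List.map_map]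
      exact List.map_id _
    rw [hk1]
    exact (pvOfList_perm _ _ (PySem.List.sorted_perm x (fun v => v) false)).length_eq
  have hcond : (dA.size < 3) ↔ (PySem.List.len (pvRunHeads pairs1) < 3) := by
    rw [PySem.List.len_eq, hheads1, hsizeA]
    omega
  by_cases hlt : dA.size < 3
  · rw [if_pos hlt, if_pos (hcond.mp hlt)]
  · rw [if_neg hlt, if_neg (fun hh => hlt (hcond.mpr hh))]
    -- A's values list
    have hknodup : (dA.items.map (fun q => q.1)).Nodup := by
      have : dA.items.map (fun q => q.1) = PySem.Set.ofList x := by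
        rw [hitemsA, List.map_map]; simp [Function.comp_def]
      rw [this]; exact PySem.Set.nodup_ofList x
    have hfresh := PySem.Dict.items_foldl_insert_fresh dA.items
      (fun (q : Int × List Int) => q.1) (fun q => pvMaxOver y q.2) PySem.Dict.empty
      (by intro a _; simp [PySem.Dict.contains, PySem.Dict.empty]) hknodup
    have hvalsA : (dA.items.foldl (fun d q => d.insert q.1 (pvMaxOver y q.2))
        PySem.Dict.empty).values
        = (PySem.Set.ofList x).map (fun k => pvMaxOver y (pvJ x (PySem.List.len x) k)) := by
      rw [PySem.Dict.values, hfresh, hitemsA]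
      simp [PySem.Dict.empty, List.map_map, Function.comp_def]
    rw [hvalsA]
    -- B's pair list and its run heads
    set qs0 := (PySem.List.pyRange 0 (PySem.List.len x)).map
      (fun i => (PySem.List.pyGetD x i 0, -(PySem.List.pyGetD y i 0))) with hq0
    set qs := PySem.List.sorted2 qs0 (fun p => p.1) (fun p => p.2) false with hqs
    have hqperm : qs.Perm qs0 := PySem.List.sorted2_perm qs0 _ _ false
    have hq0pairs : qs0 = (pvPairs x y).map (fun p => (p.1, -p.2)) := by
      rw [hq0, pvPairs, List.map_map]
      rfl
    have hheads2 : pvRunHeads qs = (PySem.Set.ofList (qs.map (·.1))).map (fun k => pvKeyMin qs k) := by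
      rw [pvRunHeads_eq]
      exact pvRunAux_sorted qs.length qs (le_refl _) (pvSorted2_pairwise qs0)
    -- each run head is the negated group maximum
    have hmin : ∀ k : Int, pvKeyMin qs k = -(pvMaxOver y (pvJ x (PySem.List.len x) k)) := by
      intro k
      have h1 : pvKeyMin qs k = pvKeyMin qs0 k :=
        pvMin'_perm _ _ ((hqperm.filter _).map _)
      have h2 : qs0.filter (fun p => p.1 == k)
          = ((pvPairs x y).filter (fun p => p.1 == k)).map (fun p => (p.1, -p.2)) := by
        rw [hq0pairs, List.filter_map]
        rfl
      rw [h1, pvKeyMin, h2, List.map_map, ← pvKeyMax_pairs x y k, pvKeyMax]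
      rw [show ((fun p : Int × Int => p.2) ∘ (fun p : Int × Int => (p.1, -p.2)))
            = (fun v : Int => -v) ∘ (fun p : Int × Int => p.2) from rfl]
      rw [← List.map_map]
      exact pvMin'_neg _
    -- the two value lists are permutations
    have hkeysperm : (PySem.Set.ofList (qs.map (·.1))).Perm (PySem.Set.ofList x) := by
      apply pvOfList_perm
      have h3 : qs0.map (·.1) = x := by
        rw [hq0, List.map_map]
        rw [show ((fun p : Int × Int => p.1) ∘ fun i => (PySem.List.pyGetD x i 0, -(PySem.List.pyGetD y i 0)))
              = (fun i => PySem.List.pyGetD x i 0) from rfl]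
        rw [PySem.List.len_eq]
        exact PySem.List.map_pyGetD_pyRange_zero' x 0
      exact (h3 ▸ (hqperm.map (·.1)) : (qs.map (·.1)).Perm x)
    have hmapped : (pvRunHeads qs).map (fun h => -h)
        = (PySem.Set.ofList (qs.map (·.1))).map (fun k => pvMaxOver y (pvJ x (PySem.List.len x) k)) := by
      rw [hheads2, List.map_map]
      apply List.map_congr_left
      intro k _
      simp only [Function.comp]
      rw [hmin k]
      ring
    -- both sides sort the same multiset descending, so the sorted lists coincide
    have hperm2 : ((pvRunHeads qs).map (fun h => -h)).Perm
        ((PySem.Set.ofList x).map (fun k => pvMaxOver y (pvJ x (PySem.List.len x) k))) := by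
      rw [hmapped]
      exact hkeysperm.map _
    set valsA := (PySem.Set.ofList x).map (fun k => pvMaxOver y (pvJ x (PySem.List.len x) k)) with hvA
    set valsB := (pvRunHeads qs).map (fun h => -h) with hvB
    have hsorted_eq : PySem.List.sorted valsA (fun v => v) true
        = PySem.List.sorted valsB (fun v => v) true := by
      apply PySem.List.eq_of_perm_of_pairwise_le_of_injective (fun v : Int => -v) neg_injective
      · exact ((PySem.List.sorted_perm valsA (fun v => v) true).trans hperm2.symm).trans
          (PySem.List.sorted_perm valsB (fun v => v) true).symm
      · exact (PySem.List.sorted_pairwise_rev valsA (fun v => v)).imp (by intro a b h; simp; omega)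
      · exact (PySem.List.sorted_pairwise_rev valsB (fun v => v)).imp (by intro a b h; simp; omega)
    rw [hsorted_eq]
    -- the sum of the first three
    have hlen3 : 3 ≤ (PySem.List.sorted valsB (fun v => v) true).length := by
      rw [PySem.List.length_sorted]
      have : valsB.length = valsA.length := hperm2.length_eq
      rw [this, hvA, List.length_map]
      omega
    exact pvSum_take3 _ hlen3

-- ===== VERDICT (by name: the statement is the Claim_ definition above) =====
theorem maxSumDistinctTriplet_spec : Claim_equal_maxSumDistinctTriplet := by
  intro x y _ _
  unfold Spec_maxSumDistinctTriplet
  exact pv_alt_eq x y
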